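-- pv_equiv track=rewrite | github.com/flawreen/FMI | Python/modeleExamen/nice-teams.py | taskOfPairing
-- ===== SOURCE A (Python) =====
-- def taskOfPairing(freq):
-- 	# Write your code here
-- 	ls = []
-- 	for i in range(len(freq)):
-- 		ls.extend([i+1 for _ in range(freq[i])])
-- 	i = 0
-- 	counter = 0
-- 	while i < len(ls)-1:
-- 		if ls[i+1] - ls[i] <= 1:
-- 			del ls[i:i+2]
-- 			counter += 1
-- 		else:
-- 			i += 1
-- 	return counter
-- ===== SOURCE B (Python) =====
-- def taskOfPairing(freq):
--     counter = 0
--     pending = None  # value of one unpaired flavor carried forward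
--     for i, f in enumerate(freq):
--         c = f if f > 0 else 0
--         if c == 0:
--             continue
--         v = i + 1
--         if pending is not None and v - pending <= 1:
--             counter += 1
--             c -= 1
--             pending = None
--         counter += c // 2
--         pending = v if c % 2 == 1 else None
--     return counter
-- ===== Notes on version B (the rewrite author's own statement) =====
-- stated objective: faster
-- what changed: A materializes the whole multiset as a list and repeatedly deletes adjacent pairs in place (quadratic in the total count); B never builds the list: one pass over the frequency array pairing within each flavor and carrying at most one pending unpaired element to the next flavor.
import Mathlib
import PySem

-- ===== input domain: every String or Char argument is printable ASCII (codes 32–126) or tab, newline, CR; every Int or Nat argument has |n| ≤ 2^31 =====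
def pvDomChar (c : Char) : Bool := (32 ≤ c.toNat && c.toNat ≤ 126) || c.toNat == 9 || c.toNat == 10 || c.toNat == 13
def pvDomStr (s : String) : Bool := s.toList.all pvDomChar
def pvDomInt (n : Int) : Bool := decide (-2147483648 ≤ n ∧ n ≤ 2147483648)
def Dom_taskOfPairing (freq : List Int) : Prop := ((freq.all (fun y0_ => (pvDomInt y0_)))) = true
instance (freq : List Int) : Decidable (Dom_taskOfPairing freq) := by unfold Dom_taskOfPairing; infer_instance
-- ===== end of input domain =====

-- B replaces A's quadratic build-then-delete greedy by a single pass over the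
-- counts carrying at most one pending unpaired element (faster, asymptotic).

-- ===== PORT A =====
-- the for-loop building ls: for each index, extend with freq[i] copies of i+1
-- (Python range(freq[i]) is empty for freq[i] ≤ 0, matching Int.toNat)
def pvBuildLs (freq : List Int) (v : Int) : List Int :=
  match freq with
  | [] => []
  | f :: fs => List.replicate f.toNat v ++ pvBuildLs fs (v + 1)

-- the while loop: del ls[i:i+2] is ls.take i ++ ls.drop (i+2); the fuel
-- argument only makes the recursion structural (2*len(ls)+1 steps always suffice,
-- proved in pvLoopA_eq below); each step is exactly one iteration of A's loop
def pvLoopA (fuel : Nat) (ls : List Int) (i : Nat) (counter : Int) : Int :=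
  match fuel with
  | 0 => counter
  | fuel + 1 =>
    if i < ls.length - 1 then
      if ls[i+1]! - ls[i]! ≤ 1 then
        pvLoopA fuel (ls.take i ++ ls.drop (i+2)) i (counter + 1)
      else
        pvLoopA fuel ls (i+1) counter
    else counter

def taskOfPairing (freq : List Int) : Int :=
  pvLoopA (2 * (pvBuildLs freq 1).length + 1) (pvBuildLs freq 1) 0 0

-- ===== PORT B =====
def pvScanB (fs : List Int) (i : Int) (counter : Int) (pending : Option Int) : Int :=
  match fs with
  | [] => counter
  | f :: rest =>
    let c : Int := if f > 0 then f else 0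
    if c = 0 then pvScanB rest (i + 1) counter pending
    else
      let v : Int := i + 1
      match pending with
      | some p =>
        if v - p ≤ 1 then
          let c' := c - 1
          pvScanB rest (i + 1) (counter + 1 + PySem.Int.floordiv c' 2)
            (if PySem.Int.mod c' 2 = 1 then some v else none)
        else
          pvScanB rest (i + 1) (counter + PySem.Int.floordiv c 2)
            (if PySem.Int.mod c 2 = 1 then some v else none)
      | none =>
        pvScanB rest (i + 1) (counter + PySem.Int.floordiv c 2)
          (if PySem.Int.mod c 2 = 1 then some v else none)

def taskOfPairing_alt (freq : List Int) : Int :=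
  pvScanB freq 0 0 none

-- ===== PRECONDITION & SPEC =====
def Spec_taskOfPairing (freq : List Int) (out : Int) : Prop := out = taskOfPairing_alt freq
instance (freq : List Int) (out : Int) : Decidable (Spec_taskOfPairing freq out) := by unfold Spec_taskOfPairing; infer_instance

-- ===== CLAIM (what is proved, stated in full; the proofs are below) =====
def Claim_equal_taskOfPairing : Prop := ∀ (freq : List Int), Dom_taskOfPairing freq → Spec_taskOfPairing freq (taskOfPairing freq)

-- ===== LEMMAS AND PROOFS =====

-- A's while loop seen from position i only depends on ls.drop i: pvG is that view.
def pvG : List Int → Int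
  | [] => 0
  | [_] => 0
  | a :: b :: t => if b - a ≤ 1 then 1 + pvG t else pvG (b :: t)
termination_by l => l.length

theorem pvG_cons2_le (a b : Int) (t : List Int) (h : b - a ≤ 1) :
    pvG (a :: b :: t) = 1 + pvG t := by simp [pvG, h]

theorem pvG_cons2_gt (a b : Int) (t : List Int) (h : ¬ b - a ≤ 1) :
    pvG (a :: b :: t) = pvG (b :: t) := by simp [pvG, h]

theorem pvLoopA_eq : ∀ (fuel : Nat) (ls : List Int) (i : Nat) (counter : Int),
    2 * ls.length - i < fuel →
    pvLoopA fuel ls i counter = counter + pvG (ls.drop i) := by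
  intro fuel
  induction fuel with
  | zero => intro ls i counter h; omega
  | succ fuel ih =>
    intro ls i counter h
    by_cases hlt : i < ls.length - 1
    · have hi1 : i + 1 < ls.length := by omega
      have hi : i < ls.length := by omega
      have hd : ls.drop i = ls[i] :: ls[i+1] :: ls.drop (i+2) := by
        rw [List.drop_eq_getElem_cons hi, List.drop_eq_getElem_cons hi1]
      by_cases hle : ls[i+1]! - ls[i]! ≤ 1
      · have hle' : ls[i+1] - ls[i] ≤ 1 := by
          simpa [getElem!_pos, hi, hi1] using hle
        have hlen : (ls.take i ++ ls.drop (i+2)).length = ls.length - 2 := by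
          simp [List.length_take, List.length_drop]; omega
        have htk : List.drop i (List.take i ls ++ List.drop (i+2) ls) = List.drop (i+2) ls :=
          List.drop_left' (by simp [List.length_take]; omega)
        rw [show pvLoopA (fuel+1) ls i counter
              = pvLoopA fuel (ls.take i ++ ls.drop (i+2)) i (counter + 1) by
            simp only [pvLoopA]; rw [if_pos hlt, if_pos hle]]
        rw [ih _ _ _ (by rw [hlen]; omega), htk, hd, pvG_cons2_le _ _ _ hle']
        ring
      · have hle' : ¬ ls[i+1] - ls[i] ≤ 1 := by
          simpa [getElem!_pos, hi, hi1] using hle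
        have hd1 : ls.drop (i+1) = ls[i+1] :: ls.drop (i+2) := by
          rw [List.drop_eq_getElem_cons hi1]
        rw [show pvLoopA (fuel+1) ls i counter = pvLoopA fuel ls (i+1) counter by
            simp only [pvLoopA]; rw [if_pos hlt, if_neg hle]]
        rw [ih _ _ _ (by omega), hd1, hd, pvG_cons2_gt _ _ _ hle']
    · rw [show pvLoopA (fuel+1) ls i counter = counter by
        simp only [pvLoopA]; rw [if_neg hlt]]
      have hlen : (ls.drop i).length ≤ 1 := by simp [List.length_drop]; omega
      match hm : ls.drop i with
      | [] => simp [pvG]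
      | [a] => simp [pvG]
      | a :: b :: t => rw [hm] at hlen; simp at hlen

theorem pvG_replicate (rest : List Int) (v : Int) (c : Nat) :
    pvG (List.replicate c v ++ rest) = ((c / 2 : Nat) : Int) + pvG (List.replicate (c % 2) v ++ rest) := by
  induction c using Nat.twoStepInduction with
  | zero => simp
  | one => simp
  | more c ih _ =>
    have hrep : List.replicate (c+2) v ++ rest = v :: v :: (List.replicate c v ++ rest) := by
      simp [List.replicate_succ]
    rw [hrep, pvG_cons2_le _ _ _ (by omega), ih]
    have h1 : (c+2) % 2 = c % 2 := by omega
    have h2 : (c+2) / 2 = c / 2 + 1 := by omega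
    rw [h1, h2]
    push_cast
    ring

theorem pvG_rep_opt (c : Nat) (v : Int) (t : List Int) :
    pvG (List.replicate c v ++ t)
      = ((c / 2 : Nat) : Int) + pvG ((if c % 2 = 1 then some v else none).toList ++ t) := by
  rw [pvG_replicate]
  rcases Nat.mod_two_eq_zero_or_one c with h | h <;> simp [h]

theorem pvScanB_cons_skip (f : Int) (rest : List Int) (i counter : Int) (p : Option Int)
    (hf : ¬ 0 < f) :
    pvScanB (f :: rest) i counter p = pvScanB rest (i+1) counter p := by
  simp only [pvScanB]
  rw [if_neg (by omega : ¬ f > 0), if_pos rfl]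

theorem pvScanB_cons_none (f : Int) (rest : List Int) (i counter : Int) (hf : 0 < f) :
    pvScanB (f :: rest) i counter none
      = pvScanB rest (i+1) (counter + PySem.Int.floordiv f 2)
          (if PySem.Int.mod f 2 = 1 then some (i+1) else none) := by
  simp only [pvScanB]
  rw [if_pos (by omega : f > 0), if_neg (by omega : ¬ f = 0)]

theorem pvScanB_cons_some_near (f : Int) (rest : List Int) (i counter q : Int)
    (hf : 0 < f) (hc : i + 1 - q ≤ 1) :
    pvScanB (f :: rest) i counter (some q)
      = pvScanB rest (i+1) (counter + 1 + PySem.Int.floordiv (f-1) 2)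
          (if PySem.Int.mod (f-1) 2 = 1 then some (i+1) else none) := by
  simp only [pvScanB]
  rw [if_pos (by omega : f > 0), if_neg (by omega : ¬ f = 0), if_pos hc]

theorem pvScanB_cons_some_far (f : Int) (rest : List Int) (i counter q : Int)
    (hf : 0 < f) (hc : ¬ i + 1 - q ≤ 1) :
    pvScanB (f :: rest) i counter (some q)
      = pvScanB rest (i+1) (counter + PySem.Int.floordiv f 2)
          (if PySem.Int.mod f 2 = 1 then some (i+1) else none) := by
  simp only [pvScanB]
  rw [if_pos (by omega : f > 0), if_neg (by omega : ¬ f = 0), if_neg hc]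

theorem pvOptOfMod (g v : Int) (hg : 0 ≤ g) :
    (if PySem.Int.mod g 2 = 1 then some v else none)
      = (if g.toNat % 2 = 1 then some v else none) := by
  rw [PySem.Int.mod_eq_emod_of_pos (by omega : (0:Int) < 2)]
  by_cases h : g.toNat % 2 = 1
  · rw [if_pos h, if_pos (by omega)]
  · rw [if_neg h, if_neg (by omega)]

theorem pvFloordivToNat (g : Int) (hg : 0 ≤ g) :
    PySem.Int.floordiv g 2 = ((g.toNat / 2 : Nat) : Int) := by
  rw [PySem.Int.floordiv_eq_ediv_of_pos (by omega : (0:Int) < 2)]; omega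

theorem pvScanB_eq (fs : List Int) : ∀ (i counter : Int) (p : Option Int),
    pvScanB fs i counter p = counter + pvG (p.toList ++ pvBuildLs fs (i+1)) := by
  induction fs with
  | nil =>
    intro i counter p
    cases p <;> simp [pvScanB, pvBuildLs, pvG]
  | cons f rest ih =>
    intro i counter p
    by_cases hf : 0 < f
    · have hfn : ((f.toNat : Int)) = f := Int.toNat_of_nonneg hf.le
      match p with
      | none =>
        rw [pvScanB_cons_none f rest i counter hf, ih]
        show _ = counter + pvG ([] ++ (List.replicate f.toNat (i+1) ++ pvBuildLs rest (i+1+1)))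
        rw [List.nil_append, pvG_rep_opt f.toNat (i+1) (pvBuildLs rest (i+1+1))]
        rw [pvFloordivToNat f hf.le, pvOptOfMod f (i+1) hf.le]
        ring
      | some q =>
        have hd : (some q).toList ++ (pvBuildLs (f :: rest) (i+1))
            = q :: ((i+1) :: (List.replicate (f.toNat - 1) (i+1) ++ pvBuildLs rest (i+1+1))) := by
          show [q] ++ (List.replicate f.toNat (i+1) ++ _) = _
          rw [show f.toNat = (f.toNat - 1) + 1 by omega, List.replicate_succ]
          simp
        by_cases hc : (i+1) - q ≤ 1
        · -- pair the pending element with one element of this group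
          rw [pvScanB_cons_some_near f rest i counter q hf hc, ih, hd]
          rw [pvG_cons2_le _ _ _ hc]
          rw [pvG_rep_opt (f.toNat - 1) (i+1) (pvBuildLs rest (i+1+1))]
          have he : f.toNat - 1 = (f-1).toNat := by omega
          rw [he, pvFloordivToNat (f-1) (by omega), pvOptOfMod (f-1) (i+1) (by omega)]
          ring
        · -- pending element too far: abandoned; group pairs internally
          rw [pvScanB_cons_some_far f rest i counter q hf hc, ih, hd]
          rw [pvG_cons2_gt _ _ _ hc]
          have hback : (i+1) :: (List.replicate (f.toNat - 1) (i+1) ++ pvBuildLs rest (i+1+1))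
              = List.replicate f.toNat (i+1) ++ pvBuildLs rest (i+1+1) := by
            rw [show f.toNat = (f.toNat - 1) + 1 by omega, List.replicate_succ]
            simp
          rw [hback, pvG_rep_opt f.toNat (i+1) (pvBuildLs rest (i+1+1))]
          rw [pvFloordivToNat f hf.le, pvOptOfMod f (i+1) hf.le]
          ring
    · -- empty group: skipped on both sides
      have h0 : f.toNat = 0 := by omega
      rw [pvScanB_cons_skip f rest i counter p hf, ih]
      show _ = counter + pvG (p.toList ++ (List.replicate f.toNat (i+1) ++ pvBuildLs rest (i+1+1)))
      rw [h0]
      simp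

-- ===== VERDICT (by name: the statement is the Claim_ definition above) =====
theorem taskOfPairing_spec : Claim_equal_taskOfPairing := by
  unfold Claim_equal_taskOfPairing Spec_taskOfPairing
  intro freq _
  unfold taskOfPairing taskOfPairing_alt
  rw [pvLoopA_eq _ _ _ _ (by omega), pvScanB_eq]
  norm_num
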